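-- pv_equiv track=rewrite | github.com/ampactor-labs/lux | bootstrap/scripts/migrate_list_head_to_first_records.py | replace_in_func
-- ===== SOURCE A (Python) =====
-- def replace_in_func(func_name, code):
--     lines = code.split('\n')
--     out_lines = []
--     in_func = False
--     for line in lines:
--         if line.startswith(f"fn {func_name}"):
--             in_func = True
--         elif in_func and line.startswith("fn "):
--             in_func = False
--
--         if in_func:
--             line = line.replace("list_head", "list_first")
--             line = line.replace("list_tail", "list_rest")
--         out_lines.append(line)
--     return '\n'.join(out_lines)
-- ===== SOURCE B (Python) =====
-- def replace_in_func(func_name, code):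
--     lines = code.split('\n')
--     # Partition the lines into consecutive blocks, a new block at each line
--     # starting with "fn "; then rewrite whole blocks whose header matches.
--     blocks = []
--     cur = None
--     for line in lines:
--         if cur is None:
--             cur = [line]
--         elif line.startswith("fn "):
--             blocks.append(cur)
--             cur = [line]
--         else:
--             cur.append(line)
--     if cur is not None:
--         blocks.append(cur)
--     header = "fn " + func_name
--     out = []
--     for block in blocks:
--         if block[0].startswith(header):
--             out.extend(l.replace("list_head", "list_first").replace("list_tail", "list_rest")
--                        for l in block)
--         else:
--             out.extend(block)
--     return '\n'.join(out)
-- ===== Notes on version B (the rewrite author's own statement) =====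
-- stated objective: alternative
-- what changed: Replaces the line-by-line in_func boolean-flag scan by an explicit two-phase block decomposition: lines are first partitioned into consecutive blocks starting at each 'fn ' line, then every block whose first line matches 'fn <func_name>' is rewritten wholesale; no flag is threaded through the loop.
import Mathlib
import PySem

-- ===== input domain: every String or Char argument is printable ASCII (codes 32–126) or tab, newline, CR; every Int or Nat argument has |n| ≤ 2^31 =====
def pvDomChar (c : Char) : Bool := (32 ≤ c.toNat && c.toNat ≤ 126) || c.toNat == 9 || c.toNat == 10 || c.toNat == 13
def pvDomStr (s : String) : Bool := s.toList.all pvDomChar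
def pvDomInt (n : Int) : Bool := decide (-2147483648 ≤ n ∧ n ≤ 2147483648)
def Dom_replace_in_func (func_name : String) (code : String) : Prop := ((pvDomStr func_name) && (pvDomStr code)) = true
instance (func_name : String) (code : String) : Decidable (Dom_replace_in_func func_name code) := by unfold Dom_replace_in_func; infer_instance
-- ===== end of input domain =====

-- B replaces A's line-by-line in_func flag scan by an explicit block decomposition
-- (blocks start at "fn " lines; matching blocks are rewritten wholesale): alternative
-- decomposition, same O(n) cost.

-- ===== PORT A =====
-- the two .replace calls applied to a line inside the active region (shared by both ports)
def pvRepl (line : String) : String :=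
  PySem.Str.replace (PySem.Str.replace line "list_head" "list_first") "list_tail" "list_rest"

-- the body of A's for-loop: state = (out_lines, in_func)
def pvStepA (func_name : String) (st : List String × Bool) (line : String) :
    List String × Bool :=
  let in_func :=
    if PySem.Str.startswith line ("fn " ++ func_name) then true
    else if st.2 && PySem.Str.startswith line "fn " then false
    else st.2
  let line' := if in_func then pvRepl line else line
  (st.1 ++ [line'], in_func)

def replace_in_func (func_name : String) (code : String) : String :=
  let lines := (PySem.Str.split? code "\n").getD []  -- split? is some here: sep = "\n" ≠ ""
  PySem.Str.join "\n" (lines.foldl (pvStepA func_name) ([], false)).1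

-- ===== PORT B =====
-- the body of B's grouping loop: state = (blocks, cur); a nonempty block is (head, tail)
def pvGStep (st : List (String × List String) × Option (String × List String))
    (line : String) : List (String × List String) × Option (String × List String) :=
  match st.2 with
  | none => (st.1, some (line, []))
  | some cur =>
    if PySem.Str.startswith line "fn " then (st.1 ++ [cur], some (line, []))
    else (st.1, some (cur.1, cur.2 ++ [line]))

-- the body of B's output loop: rewrite a whole block iff its first line matches the header
def pvProcBlock (header : String) (blk : String × List String) : List String :=
  if PySem.Str.startswith blk.1 header then (blk.1 :: blk.2).map pvRepl
  else blk.1 :: blk.2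

def replace_in_func_alt (func_name : String) (code : String) : String :=
  let lines := (PySem.Str.split? code "\n").getD []  -- split? is some here: sep = "\n" ≠ ""
  let st := lines.foldl pvGStep ([], none)
  let blocks := match st.2 with | none => st.1 | some c => st.1 ++ [c]
  let header := "fn " ++ func_name
  PySem.Str.join "\n" (blocks.flatMap (pvProcBlock header))

-- ===== PRECONDITION & SPEC =====
def Spec_replace_in_func (func_name : String) (code : String) (out : String) : Prop := out = replace_in_func_alt func_name code
instance (func_name : String) (code : String) (out : String) : Decidable (Spec_replace_in_func func_name code out) := by unfold Spec_replace_in_func; infer_instance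

-- ===== CLAIM (what is proved, stated in full; the proofs are below) =====
def Claim_equal_replace_in_func : Prop := ∀ (func_name : String) (code : String), Dom_replace_in_func func_name code → Spec_replace_in_func func_name code (replace_in_func func_name code)

-- ===== LEMMAS AND PROOFS =====

-- a line starting with "fn <func_name>" starts with "fn "
theorem pv_startswith_mono (l fn : String)
    (h : PySem.Str.startswith l ("fn " ++ fn) = true) :
    PySem.Str.startswith l "fn " = true := by
  simp only [PySem.Str.startswith_eq, PySem.Chars.startswith_iff, String.toList_append] at h ⊢
  exact (List.prefix_append _ _).trans h

-- common recursive form of both outputs: remaining lines + current flag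
def pvRec (fn : String) : List String → Bool → List String
  | [], _ => []
  | l :: ls, b =>
    if PySem.Str.startswith l "fn " then
      let b' := PySem.Str.startswith l ("fn " ++ fn)
      (if b' then pvRepl l else l) :: pvRec fn ls b'
    else
      (if b then pvRepl l else l) :: pvRec fn ls b

theorem pv_foldlA (fn : String) (ls : List String) :
    ∀ (acc : List String) (b : Bool),
      (ls.foldl (pvStepA fn) (acc, b)).1 = acc ++ pvRec fn ls b := by
  induction ls with
  | nil => intro acc b; simp [pvRec]
  | cons l ls ih =>
    intro acc b
    by_cases hq : PySem.Str.startswith l "fn " = true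
    · by_cases hp : PySem.Str.startswith l ("fn " ++ fn) = true
      · simp at hq hp
        simp [List.foldl_cons, pvStepA, pvRec, hq, hp, ih]
      · simp at hq hp
        cases b <;>
          simp [List.foldl_cons, pvStepA, pvRec, hq, hp, ih]
    · have hp : PySem.Str.startswith l ("fn " ++ fn) = false := by
        cases hp' : PySem.Str.startswith l ("fn " ++ fn)
        · rfl
        · exact absurd (pv_startswith_mono l fn hp') hq
      simp at hq hp
      cases b <;>
        simp [List.foldl_cons, pvStepA, pvRec, hq, hp, ih]

theorem pv_foldlB (fn : String) (ls : List String) :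
    ∀ (bs : List (String × List String)) (h : String) (rest : List String),
      (match (ls.foldl pvGStep (bs, some (h, rest))).2 with
        | none => (ls.foldl pvGStep (bs, some (h, rest))).1
        | some c => (ls.foldl pvGStep (bs, some (h, rest))).1 ++ [c]).flatMap
          (pvProcBlock ("fn " ++ fn))
      = bs.flatMap (pvProcBlock ("fn " ++ fn))
        ++ pvProcBlock ("fn " ++ fn) (h, rest)
        ++ pvRec fn ls (PySem.Str.startswith h ("fn " ++ fn)) := by
  induction ls with
  | nil => intro bs h rest; simp [pvRec]
  | cons l ls ih =>
    intro bs h rest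
    by_cases hq : PySem.Str.startswith l "fn " = true
    · have := ih (bs ++ [(h, rest)]) l []
      simp only [List.foldl_cons, pvGStep, hq, if_true] at this ⊢
      rw [this]
      have hq' := hq
      simp at hq'
      by_cases hp : PySem.Str.startswith l ("fn " ++ fn) = true <;>
        by_cases hph : PySem.Str.startswith h ("fn " ++ fn) = true <;>
          simp at hp hph <;>
            simp [pvRec, pvProcBlock, hq', hp, hph, List.append_assoc]
    · have := ih bs h (rest ++ [l])
      simp only [List.foldl_cons, pvGStep, hq, if_false, Bool.false_eq_true] at this ⊢
      rw [this]
      have hq' := hq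
      simp at hq'
      by_cases hph : PySem.Str.startswith h ("fn " ++ fn) = true <;>
        simp at hph <;>
          simp [pvRec, pvProcBlock, hq', hph, List.append_assoc]

-- starting a fresh first block equals A's scan from in_func = false
theorem pv_first (fn h : String) (t : List String) :
    pvProcBlock ("fn " ++ fn) (h, []) ++ pvRec fn t (PySem.Str.startswith h ("fn " ++ fn))
      = pvRec fn (h :: t) false := by
  by_cases hq : PySem.Str.startswith h "fn " = true
  · simp at hq
    by_cases hp : PySem.Str.startswith h ("fn " ++ fn) = true <;>
      simp at hp <;>
        simp [pvProcBlock, pvRec, hq, hp]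
  · have hp : PySem.Str.startswith h ("fn " ++ fn) = false := by
      cases hp' : PySem.Str.startswith h ("fn " ++ fn)
      · rfl
      · exact absurd (pv_startswith_mono h fn hp') hq
    simp at hq hp
    simp [pvProcBlock, pvRec, hq, hp]

theorem pv_lines_eq (fn : String) (ls : List String) :
    (match (ls.foldl pvGStep ([], none)).2 with
      | none => (ls.foldl pvGStep ([], none)).1
      | some c => (ls.foldl pvGStep ([], none)).1 ++ [c]).flatMap
        (pvProcBlock ("fn " ++ fn))
    = (ls.foldl (pvStepA fn) ([], false)).1 := by
  cases ls with
  | nil => simp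
  | cons h t =>
    rw [pv_foldlA]
    simp only [List.foldl_cons, pvGStep]
    rw [pv_foldlB fn t [] h []]
    simp only [List.flatMap_nil, List.nil_append]
    rw [← pv_first fn h t]

-- ===== VERDICT (by name: the statement is the Claim_ definition above) =====
theorem replace_in_func_spec : Claim_equal_replace_in_func := by
  intro func_name code _
  unfold Spec_replace_in_func
  show PySem.Str.join _ _ = PySem.Str.join _ _
  exact congrArg (PySem.Str.join "\n") (pv_lines_eq func_name ((PySem.Str.split? code "\n").getD [])).symm
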